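-- pv_equiv track=rewrite | github.com/AI-BZ/KoreanFencingTracker | scripts/fix_de_bracket_data.py | get_standard_seeding_positions
-- ===== SOURCE A (Python) =====
-- from typing import Dict, List, Optional, Tuple, Any
--
-- def get_standard_seeding_positions(bracket_size: int) -> Dict[int, int]:
--     """
--     표준 DE 브래킷 시드 배치 반환
--     시드 번호 -> 브래킷 위치 (1-indexed)
--
--     예: 32강 브래킷
--     위치 1: 시드 1 vs 위치 2: 시드 32
--     위치 3: 시드 16 vs 위치 4: 시드 17
--     ...
--     """
--     # 표준 시드 배치 (1 vs 32, 16 vs 17 등이 16강에서 만나도록)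
--     if bracket_size == 32:
--         # 32강에서 만나는 매치업 (시드 번호 기준)
--         # 1-32, 16-17, 9-24, 8-25, 5-28, 12-21, 13-20, 4-29
--         # 3-30, 14-19, 11-22, 6-27, 7-26, 10-23, 15-18, 2-31
--         return {
--             1: 1, 32: 2, 16: 3, 17: 4, 9: 5, 24: 6, 8: 7, 25: 8,
--             5: 9, 28: 10, 12: 11, 21: 12, 13: 13, 20: 14, 4: 15, 29: 16,
--             3: 17, 30: 18, 14: 19, 19: 20, 11: 21, 22: 22, 6: 23, 27: 24,
--             7: 25, 26: 26, 10: 27, 23: 28, 15: 29, 18: 30, 2: 31, 31: 32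
--         }
--     elif bracket_size == 16:
--         return {
--             1: 1, 16: 2, 8: 3, 9: 4, 5: 5, 12: 6, 4: 7, 13: 8,
--             3: 9, 14: 10, 6: 11, 11: 12, 7: 13, 10: 14, 2: 15, 15: 16
--         }
--     else:
--         # 기본 배치 (순차)
--         return {i: i for i in range(1, bracket_size + 1)}
-- ===== SOURCE B (Python) =====
-- def get_standard_seeding_positions(bracket_size: int):
--     """Generate the standard DE seeding algorithmically instead of hardcoded tables."""
--     if bracket_size in (16, 32):
--         # Serpentine table order: double the match list until it covers half the
--         # bracket, alternating which side of each new pair the carried seed takes.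
--         order = [1]
--         while 2 * len(order) < bracket_size:
--             m = 2 * len(order) + 1
--             order = [x for i, a in enumerate(order)
--                        for x in ((a, m - a) if i % 2 == 0 else (m - a, a))]
--         # Final round: each seed a meets bracket_size+1-a, higher seed on top.
--         placed = [x for a in order for x in (a, bracket_size + 1 - a)]
--         return {seed: pos + 1 for pos, seed in enumerate(placed)}
--     return {i: i for i in range(1, bracket_size + 1)}
-- ===== Notes on version B (the rewrite author's own statement) =====
-- stated objective: idiomatic
-- what changed: Replaces the two hardcoded 16/32 seeding dicts by a serpentine doubling algorithm (start from [1], double the match order alternating pair orientation, then pair each seed with its complement), keeping the identity default unchanged.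
import Mathlib
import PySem

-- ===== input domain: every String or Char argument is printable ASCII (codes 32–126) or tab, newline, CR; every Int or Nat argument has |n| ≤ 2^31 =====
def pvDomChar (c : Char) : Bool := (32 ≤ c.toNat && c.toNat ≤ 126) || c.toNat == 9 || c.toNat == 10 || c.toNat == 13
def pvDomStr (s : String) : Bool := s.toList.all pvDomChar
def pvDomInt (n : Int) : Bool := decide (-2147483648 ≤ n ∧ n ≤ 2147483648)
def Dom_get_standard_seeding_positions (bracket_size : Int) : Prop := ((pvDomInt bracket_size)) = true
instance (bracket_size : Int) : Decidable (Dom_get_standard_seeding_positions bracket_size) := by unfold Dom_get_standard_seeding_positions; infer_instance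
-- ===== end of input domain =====

-- B replaces A's two hardcoded seeding tables for 16/32 by a serpentine doubling algorithm (objective: idiomatic/alternative, not faster).

-- ===== PORT A =====
def get_standard_seeding_positions (bracket_size : Int) : List (Int × Int) :=
  if bracket_size == 32 then
    [(1, 1), (32, 2), (16, 3), (17, 4), (9, 5), (24, 6), (8, 7), (25, 8),
     (5, 9), (28, 10), (12, 11), (21, 12), (13, 13), (20, 14), (4, 15), (29, 16),
     (3, 17), (30, 18), (14, 19), (19, 20), (11, 21), (22, 22), (6, 23), (27, 24),
     (7, 25), (26, 26), (10, 27), (23, 28), (15, 29), (18, 30), (2, 31), (31, 32)]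
  else if bracket_size == 16 then
    [(1, 1), (16, 2), (8, 3), (9, 4), (5, 5), (12, 6), (4, 7), (13, 8),
     (3, 9), (14, 10), (6, 11), (11, 12), (7, 13), (10, 14), (2, 15), (15, 16)]
  else
    -- {i: i for i in range(1, bracket_size + 1)}
    ((PySem.List.pyRange 1 (bracket_size + 1) 1).foldl
      (fun d i => d.insert i i) (PySem.Dict.empty : PySem.Dict Int Int)).items

-- ===== PORT B =====
-- the while loop of Source B; fuel is a totality guard only (the loop doubles the list each step)
def pvSerpLoop : Nat → Int → List Int → List Int
  | 0, _, order => order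
  | fuel + 1, bs, order =>
    if 2 * (order.length : Int) < bs then
      let m : Int := 2 * (order.length : Int) + 1
      pvSerpLoop fuel bs
        ((PySem.List.enumerate order 0).flatMap
          (fun p => if PySem.Int.mod p.1 2 == 0 then [p.2, m - p.2] else [m - p.2, p.2]))
    else order

def get_standard_seeding_positions_alt (bracket_size : Int) : List (Int × Int) :=
  if bracket_size == 16 || bracket_size == 32 then
    let order := pvSerpLoop bracket_size.toNat bracket_size [1]
    let placed := order.flatMap (fun a => [a, bracket_size + 1 - a])
    ((PySem.List.enumerate placed 0).foldl
      (fun d p => d.insert p.2 (p.1 + 1)) (PySem.Dict.empty : PySem.Dict Int Int)).items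
  else
    ((PySem.List.pyRange 1 (bracket_size + 1) 1).foldl
      (fun d i => d.insert i i) (PySem.Dict.empty : PySem.Dict Int Int)).items

-- ===== PRECONDITION & SPEC =====
def Spec_get_standard_seeding_positions (bracket_size : Int) (out : List (Int × Int)) : Prop := out = get_standard_seeding_positions_alt bracket_size
instance (bracket_size : Int) (out : List (Int × Int)) : Decidable (Spec_get_standard_seeding_positions bracket_size out) := by unfold Spec_get_standard_seeding_positions; infer_instance

-- ===== CLAIM (what is proved, stated in full; the proofs are below) =====
def Claim_equal_get_standard_seeding_positions : Prop := ∀ (bracket_size : Int), Dom_get_standard_seeding_positions bracket_size → Spec_get_standard_seeding_positions bracket_size (get_standard_seeding_positions bracket_size)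

-- ===== LEMMAS AND PROOFS =====

-- ===== VERDICT (by name: the statement is the Claim_ definition above) =====
theorem get_standard_seeding_positions_spec : Claim_equal_get_standard_seeding_positions := by
  intro bracket_size _
  unfold Spec_get_standard_seeding_positions
  by_cases h32 : bracket_size = 32
  · subst h32; decide
  · by_cases h16 : bracket_size = 16
    · subst h16; decide
    · simp [get_standard_seeding_positions, get_standard_seeding_positions_alt, h32, h16]
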